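-- pv_equiv track=rewrite | github.com/gengxun-henu/pyisis | examples/controlnet_construct/tiling.py | _generate_axis_starts
-- ===== SOURCE A (Python) =====
-- def _generate_axis_starts(size: int, block_size: int, overlap_size: int) -> list[int]:
--     if size <= 0:
--         raise ValueError("Image dimensions must be positive.")
--     if block_size <= 0:
--         raise ValueError("Block size must be positive.")
--     if overlap_size < 0:
--         raise ValueError("Overlap size cannot be negative.")
--     if overlap_size >= block_size:
--         raise ValueError("Overlap size must be smaller than the block size.")
--
--     if size <= block_size:
--         return [0]
--
--     starts = [0]
--     step = block_size - overlap_size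
--     last_start = size - block_size
--
--     while starts[-1] < last_start:
--         next_start = min(starts[-1] + step, last_start)
--         if next_start == starts[-1]:
--             break
--         starts.append(next_start)
--
--     return starts
-- ===== SOURCE B (Python) =====
-- def _generate_axis_starts(size: int, block_size: int, overlap_size: int) -> list[int]:
--     if size <= 0:
--         raise ValueError("Image dimensions must be positive.")
--     if block_size <= 0:
--         raise ValueError("Block size must be positive.")
--     if overlap_size < 0:
--         raise ValueError("Overlap size cannot be negative.")
--     if overlap_size >= block_size:
--         raise ValueError("Overlap size must be smaller than the block size.")
--
--     if size <= block_size: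
--         return [0]
--
--     step = block_size - overlap_size
--     last_start = size - block_size
--     # Largest multiple of step strictly below last_start, computed in closed form.
--     out = [last_start]
--     x = (last_start - 1) // step * step
--     while x >= 0:
--         out.append(x)
--         x -= step
--     out.reverse()
--     return out
-- ===== Notes on version B (the rewrite author's own statement) =====
-- stated objective: alternative
-- what changed: Builds the start list back-to-front: the largest interior multiple of step below last_start is obtained in closed form by floor division, the interior offsets are emitted in descending order by repeated subtraction with no clamping min and no break, and the list is reversed once at the end, instead of A's forward while-loop that inspects starts[-1], clamps with min and breaks.
import Mathlib
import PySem

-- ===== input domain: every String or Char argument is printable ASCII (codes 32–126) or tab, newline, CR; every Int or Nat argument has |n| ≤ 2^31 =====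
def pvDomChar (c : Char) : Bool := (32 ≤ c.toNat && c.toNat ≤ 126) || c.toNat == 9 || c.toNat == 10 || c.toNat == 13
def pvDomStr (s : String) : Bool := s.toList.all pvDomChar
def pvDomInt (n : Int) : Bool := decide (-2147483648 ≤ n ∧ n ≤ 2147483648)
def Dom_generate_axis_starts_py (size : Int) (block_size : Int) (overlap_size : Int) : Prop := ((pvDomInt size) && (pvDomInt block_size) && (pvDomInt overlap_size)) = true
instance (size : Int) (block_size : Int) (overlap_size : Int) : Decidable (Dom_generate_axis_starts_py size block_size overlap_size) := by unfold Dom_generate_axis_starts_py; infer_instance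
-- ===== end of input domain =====

-- B builds the list back-to-front: the largest interior multiple of step is computed in closed
-- form by floor division, interior offsets are emitted descending and the list reversed once;
-- return values only.

-- ===== PORT A =====
-- the while loop of A; fuel only makes the recursion total (size+1 dominates the iteration count)
def pvALoop (fuel : Nat) (step last_start : Int) (starts : List Int) : List Int :=
  match fuel with
  | 0 => starts
  | fuel + 1 =>
    let cur := (PySem.List.pyGet? starts (-1)).getD 0   -- starts[-1]; starts is never empty
    if cur < last_start then
      let next_start := min (cur + step) last_start
      if next_start = cur then starts
      else pvALoop fuel step last_start (starts ++ [next_start])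
    else starts

def generate_axis_starts_py (size : Int) (block_size : Int) (overlap_size : Int) : List Int :=
  if size ≤ 0 then []                       -- raise ValueError (excluded by Pre_)
  else if block_size ≤ 0 then []            -- raise ValueError (excluded by Pre_)
  else if overlap_size < 0 then []          -- raise ValueError (excluded by Pre_)
  else if overlap_size ≥ block_size then [] -- raise ValueError (excluded by Pre_)
  else if size ≤ block_size then [0]
  else pvALoop (size.toNat + 1) (block_size - overlap_size) (size - block_size) [0]

-- ===== PORT B =====
-- the descending while loop of Source B; fuel only makes the recursion total (x+1 dominates)
def pvBDown (fuel : Nat) (step x : Int) (out : List Int) : List Int :=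
  match fuel with
  | 0 => out
  | fuel + 1 =>
    if x ≥ 0 then pvBDown fuel step (x - step) (out ++ [x]) else out

def generate_axis_starts_py_alt (size : Int) (block_size : Int) (overlap_size : Int) : List Int :=
  if size ≤ 0 then []                       -- raise ValueError (excluded by Pre_)
  else if block_size ≤ 0 then []            -- raise ValueError (excluded by Pre_)
  else if overlap_size < 0 then []          -- raise ValueError (excluded by Pre_)
  else if overlap_size ≥ block_size then [] -- raise ValueError (excluded by Pre_)
  else if size ≤ block_size then [0]
  else
    let step := block_size - overlap_size
    let last_start := size - block_size
    let x := PySem.Int.floordiv (last_start - 1) step * step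
    (pvBDown (x.toNat + 1) step x [last_start]).reverse

-- ===== PRECONDITION & SPEC =====
-- Pre_ excludes exactly the inputs on which A raises ValueError (its four validation guards).
def Pre_generate_axis_starts_py (size : Int) (block_size : Int) (overlap_size : Int) : Prop :=
  0 < size ∧ 0 < block_size ∧ 0 ≤ overlap_size ∧ overlap_size < block_size
instance (size : Int) (block_size : Int) (overlap_size : Int) : Decidable (Pre_generate_axis_starts_py size block_size overlap_size) := by unfold Pre_generate_axis_starts_py; infer_instance
def pvWitness_generate_axis_starts_py : Int × Int × Int := (10, 4, 1)

def Spec_generate_axis_starts_py (size : Int) (block_size : Int) (overlap_size : Int) (out : List Int) : Prop := out = generate_axis_starts_py_alt size block_size overlap_size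
instance (size : Int) (block_size : Int) (overlap_size : Int) (out : List Int) : Decidable (Spec_generate_axis_starts_py size block_size overlap_size out) := by unfold Spec_generate_axis_starts_py; infer_instance

-- ===== CLAIM (what is proved, stated in full; the proofs are below) =====
def Claim_equal_generate_axis_starts_py : Prop := ∀ (size : Int) (block_size : Int) (overlap_size : Int), Dom_generate_axis_starts_py size block_size overlap_size → Pre_generate_axis_starts_py size block_size overlap_size → Spec_generate_axis_starts_py size block_size overlap_size (generate_axis_starts_py size block_size overlap_size)

-- ===== LEMMAS AND PROOFS =====

-- a positive-step pyRange unfolds one element at the front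
theorem pyRange_pos_cons {a b s : Int} (hs : 0 < s) (hab : a < b) :
    PySem.List.pyRange a b s = a :: PySem.List.pyRange (a + s) b s := by
  rw [PySem.List.pyRange_of_pos _ _ hs, PySem.List.pyRange_of_pos _ _ hs]
  have h1 : b - a + s - 1 = (b - a - 1) + 1 * s := by ring
  have h2 : (b - a - 1) / s ≥ 0 := Int.ediv_nonneg (by omega) (by omega)
  have h3 : ((b - a + s - 1) / s).toNat = ((b - a - 1) / s).toNat + 1 := by
    rw [h1, Int.add_mul_ediv_right _ _ (by omega : s ≠ 0)]
    omega
  by_cases hc : a + s < b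
  · have h4 : b - (a + s) + s - 1 = b - a - 1 := by ring
    simp only [if_pos hab, if_pos hc, h3, h4, List.range_succ_eq_map, List.map_cons,
      List.map_map]
    rw [List.cons.injEq]
    refine ⟨by simp, ?_⟩
    apply List.map_congr_left
    intro k _
    simp [Function.comp]
    ring
  · have hz : (b - a - 1) / s = 0 := Int.ediv_eq_zero_of_lt (by omega) (by omega)
    simp only [if_pos hab, if_neg hc, h3, hz, List.range_succ_eq_map]
    simp

theorem pyRange_pos_nil {a b s : Int} (hs : 0 < s) (hab : b ≤ a) :
    PySem.List.pyRange a b s = [] := by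
  rw [PySem.List.pyRange_of_pos _ _ hs]
  simp [if_neg (by omega : ¬ a < b)]

theorem pyGet_last (acc : List Int) (cur : Int) :
    (PySem.List.pyGet? (acc ++ [cur]) (-1)).getD 0 = cur := by
  simp [PySem.List.pyGet?, PySem.List.pyIdx?]

theorem pvALoop_done (fuel : Nat) (step last_start : Int) (acc : List Int) :
    pvALoop fuel step last_start (acc ++ [last_start]) = acc ++ [last_start] := by
  cases fuel with
  | zero => rfl
  | succ n => simp [pvALoop]

theorem pvALoop_spec (fuel : Nat) (step last_start cur : Int) (acc : List Int)
    (hs : 0 < step) (hcl : cur < last_start) (hf : (last_start - cur).toNat ≤ fuel) :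
    pvALoop fuel step last_start (acc ++ [cur]) =
      acc ++ PySem.List.pyRange cur last_start step ++ [last_start] := by
  induction fuel generalizing cur acc with
  | zero => omega
  | succ n ih =>
    rw [pvALoop]
    simp only [pyGet_last, if_pos hcl]
    have hne : ¬ min (cur + step) last_start = cur := by omega
    simp only [if_neg hne]
    by_cases hc : cur + step < last_start
    · have hmin : min (cur + step) last_start = cur + step := by omega
      rw [hmin, ih (cur + step) (acc ++ [cur]) hc (by omega)]
      rw [pyRange_pos_cons hs hcl]
      simp
    · have hmin : min (cur + step) last_start = last_start := by omega
      rw [hmin, pvALoop_done]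
      rw [pyRange_pos_cons hs hcl, pyRange_pos_nil hs (by omega)]

-- B's descending loop from k*step emits the multiples of step in reverse order
theorem pvBDown_neg (fuel : Nat) (step x : Int) (out : List Int) (hx : x < 0) :
    pvBDown fuel step x out = out := by
  cases fuel with
  | zero => rfl
  | succ n => rw [pvBDown, if_neg (by omega)]

theorem pvBDown_spec (k : Nat) (fuel : Nat) (step : Int) (out : List Int)
    (hs : 0 < step) (hf : k + 1 ≤ fuel) :
    pvBDown fuel step ((k : Int) * step) out =
      out ++ ((List.range (k + 1)).map (fun (i : Nat) => (i : Int) * step)).reverse := by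
  induction k generalizing fuel out with
  | zero =>
    obtain ⟨f, rfl⟩ : ∃ f, fuel = f + 1 := ⟨fuel - 1, by omega⟩
    rw [pvBDown, if_pos (by simp : ((0 : Nat) : Int) * step ≥ 0)]
    rw [pvBDown_neg _ _ _ _ (by push_cast; omega)]
    simp [List.range_succ]
  | succ k ih =>
    obtain ⟨f, rfl⟩ : ∃ f, fuel = f + 1 := ⟨fuel - 1, by omega⟩
    rw [pvBDown]
    have hx : ((k : Int) + 1) * step ≥ 0 := by positivity
    simp only [Nat.cast_succ, if_pos hx]
    have hstep : ((k : Int) + 1) * step - step = (k : Int) * step := by ring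
    rw [hstep, ih f _ (by omega)]
    conv_rhs => rw [List.range_succ]
    simp [add_mul]

-- pyRange 0 last step in terms of the closed-form count m = (last-1)/step
theorem pyRange_zero_map (last step : Int) (hs : 0 < step) (hl : 0 < last) :
    PySem.List.pyRange 0 last step =
      (List.range (((last - 1) / step).toNat + 1)).map (fun (i : Nat) => (i : Int) * step) := by
  rw [PySem.List.pyRange_of_pos _ _ hs]
  have h1 : last - 0 + step - 1 = (last - 1) + 1 * step := by ring
  have h2 : (last - 1) / step ≥ 0 := Int.ediv_nonneg (by omega) (by omega)
  have h3 : ((last - 0 + step - 1) / step).toNat = ((last - 1) / step).toNat + 1 := by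
    rw [h1, Int.add_mul_ediv_right _ _ (by omega : step ≠ 0)]
    omega
  simp only [if_pos (by omega : (0 : Int) < last), h3]
  apply List.map_congr_left
  intro k _
  ring

-- ===== VERDICT (by name: the statement is the Claim_ definition above) =====
theorem generate_axis_starts_py_spec : Claim_equal_generate_axis_starts_py := by
  intro size block_size overlap_size hdom hpre
  obtain ⟨h1, h2, h3, h4⟩ := hpre
  unfold Spec_generate_axis_starts_py generate_axis_starts_py generate_axis_starts_py_alt
  simp only [if_neg (by omega : ¬ size ≤ 0), if_neg (by omega : ¬ block_size ≤ 0),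
    if_neg (by omega : ¬ overlap_size < 0), if_neg (by omega : ¬ overlap_size ≥ block_size)]
  by_cases hsb : size ≤ block_size
  · simp [hsb]
  · simp only [if_neg hsb]
    set step := block_size - overlap_size with hstep
    set last := size - block_size with hlast
    have hspos : 0 < step := by omega
    have hlpos : 0 < last := by omega
    -- A's side
    have hA := pvALoop_spec (size.toNat + 1) step last 0 [] hspos (by omega) (by omega)
    simp only [List.nil_append] at hA
    rw [hA]
    -- B's side
    rw [PySem.Int.floordiv_eq_ediv_of_pos hspos]
    have hm : (last - 1) / step ≥ 0 := Int.ediv_nonneg (by omega) (by omega)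
    set m := (last - 1) / step with hmdef
    have hcast : m = ((m.toNat : Int)) := by omega
    have hfuel : m.toNat + 1 ≤ ((m.toNat : Int) * step).toNat + 1 := by
      have h5 : (m.toNat : Int) ≤ (m.toNat : Int) * step :=
        le_mul_of_one_le_right (by positivity) (by omega)
      omega
    rw [hcast, pvBDown_spec m.toNat _ step _ hspos hfuel]
    rw [pyRange_zero_map last step hspos hlpos]
    simp
    rw [← hmdef]
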